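-- pv_equiv track=rewrite | github.com/mnuman/advent-of-code | 2020/day06b.py | intersect_answers
-- ===== SOURCE A (Python) =====
-- def intersect_answers(list_of_member_answers):
--     """ Not a very idiomatic implementation, brute force iteration"""
--     shared_answers = ''
--     if len(list_of_member_answers) > 1:
--         for answer in list_of_member_answers[0]:
--             answer_all_members = True
--             for other_member_answers in list_of_member_answers[1:]:
--                 answer_all_members = answer_all_members and answer in other_member_answers
--             if answer_all_members:
--                 shared_answers += answer
--     else:
--         shared_answers = ''.join(list_of_member_answers[0])
--     return ''.join(shared_answers)
-- ===== SOURCE B (Python) =====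
-- def intersect_answers(list_of_member_answers):
--     first = list_of_member_answers[0]
--     common = set(first)
--     for member in list_of_member_answers[1:]:
--         common &= set(member)
--     return ''.join(c for c in first if c in common)
-- ===== Notes on version B (the rewrite author's own statement) =====
-- stated objective: idiomatic
-- what changed: Replaces the nested per-char/per-member membership scan with one fold building the intersection set across all members followed by a single order-preserving filtering pass over the first member's answers.
import Mathlib
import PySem

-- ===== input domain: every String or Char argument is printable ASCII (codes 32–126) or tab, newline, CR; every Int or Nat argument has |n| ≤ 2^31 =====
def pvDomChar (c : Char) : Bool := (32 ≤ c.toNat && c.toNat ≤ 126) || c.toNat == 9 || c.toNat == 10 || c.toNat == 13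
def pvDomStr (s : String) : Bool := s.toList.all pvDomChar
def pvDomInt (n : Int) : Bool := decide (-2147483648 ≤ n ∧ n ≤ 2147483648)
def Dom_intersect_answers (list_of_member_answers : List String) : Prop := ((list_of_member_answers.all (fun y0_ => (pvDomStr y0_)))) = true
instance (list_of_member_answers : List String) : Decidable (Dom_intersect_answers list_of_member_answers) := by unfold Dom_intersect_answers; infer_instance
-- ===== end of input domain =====

-- B replaces A's nested per-char/per-member scan by one intersection-set fold plus a single
-- filtering pass over the first member's answers (objective: idiomatic; same return value).

-- ===== PORT A =====
-- literal port: 'answer in other_member_answers' on a single char = membership in the char list;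
-- list_of_member_answers[0] / [1:] under Pre_ (non-empty) are headD "" / drop 1.
def intersect_answers (list_of_member_answers : List String) : String :=
  if ((list_of_member_answers.length : Int) > 1) then
    (list_of_member_answers.headD "").toList.foldl
      (fun shared_answers answer =>
        let answer_all_members :=
          (list_of_member_answers.drop 1).foldl
            (fun acc other_member_answers => acc && other_member_answers.toList.contains answer) true
        if answer_all_members then shared_answers.push answer else shared_answers) ""
  else
    String.ofList (list_of_member_answers.headD "").toList   -- ''.join(list_of_member_answers[0])

-- ===== PORT B =====
def intersect_answers_alt (list_of_member_answers : List String) : String :=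
  let first := (list_of_member_answers.headD "").toList
  let common : PySem.Set Char :=
    (list_of_member_answers.drop 1).foldl
      (fun s m => PySem.Set.inter s (PySem.Set.ofList m.toList)) (PySem.Set.ofList first)
  String.ofList (first.filter (fun c => PySem.Set.contains common c))

-- ===== PRECONDITION & SPEC =====
-- Pre_ excludes only the empty list, on which A (and B) raise IndexError at list_of_member_answers[0].
def Pre_intersect_answers (list_of_member_answers : List String) : Prop := list_of_member_answers ≠ []
instance (list_of_member_answers : List String) : Decidable (Pre_intersect_answers list_of_member_answers) := by unfold Pre_intersect_answers; infer_instance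
def pvWitness_intersect_answers : List String := (["abc", "bcd"])

def Spec_intersect_answers (list_of_member_answers : List String) (out : String) : Prop := out = intersect_answers_alt list_of_member_answers
instance (list_of_member_answers : List String) (out : String) : Decidable (Spec_intersect_answers list_of_member_answers out) := by unfold Spec_intersect_answers; infer_instance

-- ===== CLAIM (what is proved, stated in full; the proofs are below) =====
def Claim_equal_intersect_answers : Prop := ∀ (list_of_member_answers : List String), Dom_intersect_answers list_of_member_answers → Pre_intersect_answers list_of_member_answers → Spec_intersect_answers list_of_member_answers (intersect_answers list_of_member_answers)

-- ===== LEMMAS AND PROOFS =====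

-- A's outer loop builds the filtered string left to right.
theorem foldl_push_toList (p : Char → Bool) (cs : List Char) (s : String) :
    (cs.foldl (fun sh a => if p a then sh.push a else sh) s).toList
      = s.toList ++ cs.filter p := by
  induction cs generalizing s with
  | nil => simp
  | cons a cs ih =>
    by_cases h : p a = true <;>
      simp [List.foldl_cons, h, ih, String.toList_push]

-- A's inner loop is an 'all' over the tail.
theorem foldl_and_all (c : Char) (tail : List String) (b : Bool) :
    tail.foldl (fun acc o => acc && o.toList.contains c) b
      = (b && tail.all (fun o => o.toList.contains c)) := by
  induction tail generalizing b with
  | nil => simp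
  | cons o tail ih =>
    simp only [List.foldl_cons, List.all_cons]
    rw [ih]
    cases b <;> simp

-- Membership in B's folded intersection set.
theorem mem_foldl_inter (c : Char) (tail : List String) (s : PySem.Set Char) :
    (c ∈ tail.foldl (fun s m => PySem.Set.inter s (PySem.Set.ofList m.toList)) s)
      ↔ (c ∈ s ∧ ∀ m ∈ tail, c ∈ m.toList) := by
  induction tail generalizing s with
  | nil => simp
  | cons m tail ih =>
    simp [List.foldl_cons, ih, PySem.Set.mem_inter, PySem.Set.mem_ofList, and_assoc]

-- ===== VERDICT (by name: the statement is the Claim_ definition above) =====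
theorem intersect_answers_spec : Claim_equal_intersect_answers := by
  intro l _ hpre
  unfold Spec_intersect_answers intersect_answers intersect_answers_alt
  match l, hpre with
  | [x], _ =>
    simp only [List.length_cons, List.length_nil, List.headD, List.drop, List.foldl_nil]
    norm_num
    have hfil : List.filter (fun c => decide (c ∈ x.toList)) x.toList = x.toList :=
      List.filter_eq_self.mpr (fun c hc => by simpa using hc)
    rw [hfil]
    simp
  | x :: y :: rest, _ =>
    simp only [List.headD, List.drop]
    have hlen : (((x :: y :: rest).length : Int) > 1) := by
      simp
    rw [if_pos hlen]
    apply String.toList_inj.mp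
    show (List.foldl
        (fun shared_answers answer =>
          if ((y :: rest).foldl
              (fun acc other_member_answers => acc && other_member_answers.toList.contains answer) true)
          then shared_answers.push answer else shared_answers) "" x.toList).toList = _
    rw [foldl_push_toList
      (fun answer => (y :: rest).foldl
        (fun acc other_member_answers => acc && other_member_answers.toList.contains answer) true)]
    simp only [String.toList_empty, List.nil_append, String.toList_ofList]
    apply List.filter_congr
    intro c hc
    rw [foldl_and_all, Bool.true_and]
    have h1 : ((y :: rest).all (fun o => o.toList.contains c) = true)
        ↔ (∀ m ∈ (y :: rest), c ∈ m.toList) := by simp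
    have h2 : (PySem.Set.contains
        ((y :: rest).foldl (fun s m => PySem.Set.inter s (PySem.Set.ofList m.toList))
          (PySem.Set.ofList x.toList)) c = true)
        ↔ (∀ m ∈ (y :: rest), c ∈ m.toList) := by
      rw [PySem.Set.contains_iff, mem_foldl_inter]
      simp [(PySem.Set.mem_ofList x.toList c).mpr hc]
    exact Bool.eq_iff_iff.mpr (h1.trans h2.symm)
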